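-- pv_equiv track=rewrite | github.com/alliance-genome/agr_ai_curation | trace_review/backend/src/api/traces.py | _session_timestamp_bounds
-- ===== SOURCE A (Python) =====
-- from typing import Dict, Any, List, Optional, Tuple
--
-- def _session_timestamp_bounds(traces: List[Dict[str, Any]]) -> Tuple[Optional[str], Optional[str]]:
--     timestamps = sorted(
--         trace.get("timestamp")
--         for trace in traces
--         if trace.get("timestamp")
--     )
--     if not timestamps:
--         return None, None
--     return timestamps[0], timestamps[-1]
-- ===== SOURCE B (Python) =====
-- from typing import Dict, Any, List, Optional, Tuple
--
-- def _session_timestamp_bounds(traces: List[Dict[str, Any]]) -> Tuple[Optional[str], Optional[str]]: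
--     lo = None
--     hi = None
--     for trace in traces:
--         ts = trace.get("timestamp")
--         if not ts:
--             continue
--         if lo is None or ts < lo:
--             lo = ts
--         if hi is None or ts > hi:
--             hi = ts
--     return lo, hi
-- ===== Notes on version B (the rewrite author's own statement) =====
-- stated objective: alternative
-- what changed: Replaces collect-filter-sort-then-take-ends with a single running-extrema pass that tracks lo/hi while scanning, never building or sorting an intermediate list.
import Mathlib
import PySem

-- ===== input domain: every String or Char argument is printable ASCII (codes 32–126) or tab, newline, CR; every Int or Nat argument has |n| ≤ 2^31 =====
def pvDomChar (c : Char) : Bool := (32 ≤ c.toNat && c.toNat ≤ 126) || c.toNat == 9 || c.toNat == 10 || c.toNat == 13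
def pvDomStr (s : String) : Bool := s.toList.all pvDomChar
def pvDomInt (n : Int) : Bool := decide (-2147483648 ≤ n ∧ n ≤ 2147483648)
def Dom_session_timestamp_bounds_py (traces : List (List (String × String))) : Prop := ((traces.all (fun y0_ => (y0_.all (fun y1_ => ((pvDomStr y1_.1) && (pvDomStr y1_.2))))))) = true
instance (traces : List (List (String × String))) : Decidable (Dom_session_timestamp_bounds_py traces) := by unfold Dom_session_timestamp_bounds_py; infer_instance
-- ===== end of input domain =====

-- B replaces A's collect-filter-sort-and-take-ends with a single running-min/max pass over the traces (alternative algorithm, same measured cost).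

-- ===== PORT A =====
-- trace.get("timestamp") followed by the truthiness test (empty string is falsy):
-- shared primitive of both Pythons (`trace.get("timestamp")` / `if trace.get(...)` resp. `if not ts`).
def pvGetTs (trace : List (String × String)) : Option String :=
  match trace.lookup "timestamp" with
  | some s => if s = "" then none else some s
  | none => none

def session_timestamp_bounds_py (traces : List (List (String × String))) : Option String × Option String :=
  let timestamps := PySem.List.sorted (traces.filterMap pvGetTs) (fun x => x) false
  match timestamps with
  | [] => (none, none)
  | h :: t => (some h, some ((h :: t).getLast (by simp)))

-- ===== PORT B =====
def session_timestamp_bounds_py_alt (traces : List (List (String × String))) : Option String × Option String :=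
  traces.foldl (fun acc trace =>
    match pvGetTs trace with
    | none => acc
    | some ts =>
      let lo := match acc.1 with
        | none => some ts
        | some l => if ts < l then some ts else some l
      let hi := match acc.2 with
        | none => some ts
        | some h => if ts > h then some ts else some h
      (lo, hi)) (none, none)

-- ===== PRECONDITION & SPEC =====
def Spec_session_timestamp_bounds_py (traces : List (List (String × String))) (out : Option String × Option String) : Prop := out = session_timestamp_bounds_py_alt traces
instance (traces : List (List (String × String))) (out : Option String × Option String) : Decidable (Spec_session_timestamp_bounds_py traces out) := by unfold Spec_session_timestamp_bounds_py; infer_instance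

-- ===== CLAIM (what is proved, stated in full; the proofs are below) =====
def Claim_equal_session_timestamp_bounds_py : Prop := ∀ (traces : List (List (String × String))), Dom_session_timestamp_bounds_py traces → Spec_session_timestamp_bounds_py traces (session_timestamp_bounds_py traces)

-- ===== LEMMAS AND PROOFS =====

-- B's loop body, restricted to the timestamps that survive the truthiness filter.
def pvUpd (acc : Option String × Option String) (ts : String) : Option String × Option String :=
  (match acc.1 with
    | none => some ts
    | some l => if ts < l then some ts else some l,
   match acc.2 with
    | none => some ts
    | some h => if ts > h then some ts else some h)

lemma foldB_eq_foldUpd (traces : List (List (String × String)))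
    (init : Option String × Option String) :
    traces.foldl (fun acc trace =>
      match pvGetTs trace with
      | none => acc
      | some ts =>
        let lo := match acc.1 with
          | none => some ts
          | some l => if ts < l then some ts else some l
        let hi := match acc.2 with
          | none => some ts
          | some h => if ts > h then some ts else some h
        (lo, hi)) init = (traces.filterMap pvGetTs).foldl pvUpd init := by
  induction traces generalizing init with
  | nil => rfl
  | cons tr rest ih =>
    cases h : pvGetTs tr with
    | none => simp only [List.foldl_cons, List.filterMap_cons, h]; exact ih init
    | some ts => simp only [List.foldl_cons, List.filterMap_cons, h]; exact ih _

lemma foldUpd_some (L : List String) (a b : String) :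
    L.foldl pvUpd (some a, some b) = (some (L.foldl min a), some (L.foldl max b)) := by
  induction L generalizing a b with
  | nil => rfl
  | cons x t ih =>
    simp only [List.foldl_cons, pvUpd]
    have h1 : (if x < a then some x else some a) = some (min a x) := by
      by_cases h : x < a
      · simp [h, min_eq_right (le_of_lt h)]
      · simp [h, min_eq_left (le_of_not_gt h)]
    have h2 : (if x > b then some x else some b) = some (max b x) := by
      by_cases h : x > b
      · simp [h, max_eq_right (le_of_lt h)]
      · simp [h, max_eq_left (le_of_not_gt h)]
    simp only [h1, h2] at *
    exact ih (min a x) (max b x)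

lemma pairwise_le_getLast (l : List String) (h : l.Pairwise (· ≤ ·)) (hne : l ≠ []) :
    ∀ y ∈ l, y ≤ l.getLast hne := by
  induction l with
  | nil => simp at hne
  | cons a t ih =>
    intro y hy
    cases t with
    | nil => simp at hy; simp [hy, List.getLast]
    | cons b s =>
      have hgl : (a :: b :: s).getLast hne = (b :: s).getLast (by simp) := by
        simp [List.getLast]
      rw [hgl]
      rcases List.mem_cons.mp hy with rfl | hy'
      · have hlast : (b :: s).getLast (by simp) ∈ b :: s := List.getLast_mem _
        exact (List.pairwise_cons.mp h).1 _ hlast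
      · exact ih (List.pairwise_cons.mp h).2 (by simp) y hy'

lemma sorted_head_eq_foldl_min (x : String) (t : List String) (m : String) (ms : List String)
    (hs : PySem.List.sorted (x :: t) (fun y => y) false = m :: ms) :
    m = t.foldl min x := by
  have hmin_mem : t.foldl min x ∈ x :: t := by
    have := PySem.List.min?_mem (xs := x :: t) (key := fun y => y) (m := t.foldl min x)
      (by rw [PySem.List.min?_id_cons])
    exact this
  have hmin_le : ∀ y ∈ x :: t, t.foldl min x ≤ y := by
    intro y hy
    exact PySem.List.min?_isMin (by rw [PySem.List.min?_id_cons]) y hy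
  have hm_mem : m ∈ x :: t := by
    apply (PySem.List.mem_sorted (x :: t) (fun y => y) false m).mp
    rw [hs]; exact List.mem_cons_self
  have hm_le : ∀ y ∈ x :: t, m ≤ y := PySem.List.key_head_sorted_le (x :: t) (fun y => y) hs
  exact le_antisymm (hm_le _ hmin_mem) (hmin_le _ hm_mem)

lemma sorted_last_eq_foldl_max (x : String) (t : List String) (m : String) (ms : List String)
    (hs : PySem.List.sorted (x :: t) (fun y => y) false = m :: ms) :
    (m :: ms).getLast (by simp) = t.foldl max x := by
  have hmax_mem : t.foldl max x ∈ x :: t := by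
    have := PySem.List.max?_mem (xs := x :: t) (key := fun y => y) (m := t.foldl max x)
      (by rw [PySem.List.max?_id_cons])
    exact this
  have hmax_ge : ∀ y ∈ x :: t, y ≤ t.foldl max x := by
    intro y hy
    exact PySem.List.max?_isMax (by rw [PySem.List.max?_id_cons]) y hy
  have hpw : (m :: ms).Pairwise (· ≤ ·) := by
    have := PySem.List.sorted_pairwise (x :: t) (fun y => y)
    rw [hs] at this
    exact this
  have hlast_mem : (m :: ms).getLast (by simp) ∈ x :: t := by
    apply (PySem.List.mem_sorted (x :: t) (fun y => y) false _).mp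
    rw [hs]; exact List.getLast_mem _
  have hge_last : ∀ y ∈ x :: t, y ≤ (m :: ms).getLast (by simp) := by
    intro y hy
    have hy' : y ∈ m :: ms := by
      rw [← hs]; exact (PySem.List.mem_sorted (x :: t) (fun y => y) false y).mpr hy
    exact pairwise_le_getLast _ hpw (by simp) y hy'
  exact le_antisymm (hmax_ge _ hlast_mem) (hge_last _ hmax_mem)

-- ===== VERDICT (by name: the statement is the Claim_ definition above) =====
theorem session_timestamp_bounds_py_spec : Claim_equal_session_timestamp_bounds_py := by
  intro traces _
  unfold Spec_session_timestamp_bounds_py session_timestamp_bounds_py session_timestamp_bounds_py_alt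
  rw [foldB_eq_foldUpd]
  cases hL : traces.filterMap pvGetTs with
  | nil => rfl
  | cons x t =>
    cases hs : PySem.List.sorted (x :: t) (fun y => y) false with
    | nil => exact absurd ((PySem.List.sorted_eq_nil_iff (x :: t) (fun y => y) false).mp hs) (by simp)
    | cons m ms =>
      have hB : (x :: t).foldl pvUpd (none, none) = (some (t.foldl min x), some (t.foldl max x)) := by
        simpa [pvUpd] using foldUpd_some t x x
      have hmin := sorted_head_eq_foldl_min x t m ms hs
      have hmax := sorted_last_eq_foldl_max x t m ms hs
      rw [hB, ← hmin, ← hmax]
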